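-- pv_equiv track=rewrite | github.com/miliar/Code_Jam_Webscraper | solutions_python/Problem_55/216.py | solve
-- ===== SOURCE A (Python) =====
-- def solve(R,k0,N,gi):
-- 	money=0
-- 	ptr=0
-- 	g=int(gi[ptr])
-- 	for r in range(0,R):
-- 		k=k0
-- 		G=0
-- 		while g<=k and G<len(gi):
-- 			k=k-g
-- 			money+=g
-- 			G=G+1
-- 			if ptr+1<len(gi):
-- 				ptr=ptr+1
-- 			else:
-- 				ptr=0
-- 			g=int(gi[ptr])
-- 	return money
-- ===== SOURCE B (Python) =====
-- def solve(R, k0, N, gi):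
--     n = len(gi)
--     cache = {}  # start pointer -> (ride earnings, next start pointer), computed on demand
--     money, ptr = 0, 0
--     for _ in range(R):
--         if ptr in cache:
--             e, nxt = cache[ptr]
--         else:
--             k, e, q = k0, 0, ptr
--             for _ in range(n):
--                 g = gi[q]
--                 if g > k:
--                     break
--                 k -= g
--                 e += g
--                 q = (q + 1) % n
--             nxt = q
--             cache[ptr] = (e, nxt)
--         money += e
--         ptr = nxt
--     return money
-- ===== Notes on version B (the rewrite author's own statement) =====
-- stated objective: alternative
-- what changed: B memoizes each start pointer's ride outcome (earnings, next pointer) in a dict built on demand, so a ride starting from an already-seen pointer is a single lookup instead of re-running the boarding while-loop.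
import Mathlib
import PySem

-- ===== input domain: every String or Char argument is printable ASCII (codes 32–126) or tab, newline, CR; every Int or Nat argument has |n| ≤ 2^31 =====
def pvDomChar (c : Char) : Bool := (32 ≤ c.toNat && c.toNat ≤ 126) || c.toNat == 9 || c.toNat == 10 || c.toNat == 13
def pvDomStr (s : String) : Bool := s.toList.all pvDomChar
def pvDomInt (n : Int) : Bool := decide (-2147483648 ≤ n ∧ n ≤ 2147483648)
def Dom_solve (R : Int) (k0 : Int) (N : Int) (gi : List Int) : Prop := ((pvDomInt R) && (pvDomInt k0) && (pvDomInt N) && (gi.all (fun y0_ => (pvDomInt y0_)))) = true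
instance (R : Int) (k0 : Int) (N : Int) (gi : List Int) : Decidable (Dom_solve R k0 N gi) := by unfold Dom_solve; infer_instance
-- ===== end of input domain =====

-- B memoizes one ride's outcome (earnings, next pointer) per start pointer in a dict,
-- so a ride from an already-seen start pointer is a single lookup instead of a re-simulation.

-- ===== PORT A =====
-- inner 'while g<=k and G<len(gi)' loop of A; state (money, ptr, g); ptr stays in range so
-- getD reads the same element Python's in-range gi[ptr] reads
def innerA (gi : List Int) (k money : Int) (G ptr : Nat) (g : Int) : Int × Nat × Int :=
  if h : g ≤ k ∧ G < gi.length then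
    let k' := k - g
    let money' := money + g
    let G' := G + 1
    let ptr' := if ptr + 1 < gi.length then ptr + 1 else 0
    innerA gi k' money' G' ptr' (gi.getD ptr' 0)
  else (money, ptr, g)
termination_by gi.length - G
decreasing_by omega

def solveStep (gi : List Int) (k0 : Int) (st : Int × Nat × Int) (_r : Int) : Int × Nat × Int :=
  innerA gi k0 st.1 0 st.2.1 st.2.2

def solve (R : Int) (k0 : Int) (N : Int) (gi : List Int) : Int :=
  -- g = int(gi[ptr]) with ptr = 0: Python raises IndexError on gi = [], excluded by Pre_solve
  ((PySem.List.pyRange 0 R 1).foldl (solveStep gi k0) (0, 0, gi.getD 0 0)).1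

-- ===== PORT B =====
-- 'for _ in range(n): … break' inner loop of B, fuel = n; q stays in range under Pre_solve
def rideAux (gi : List Int) (k earn : Int) (q : Nat) : Nat → Int × Nat
  | 0 => (earn, q)
  | fuel + 1 =>
    let g := gi.getD q 0
    if g > k then (earn, q)
    else rideAux gi (k - g) (earn + g) ((q + 1) % gi.length) fuel

def rideB (gi : List Int) (k0 : Int) (p : Nat) : Int × Nat :=
  rideAux gi k0 0 p gi.length

-- one iteration of B's ride loop: 'if ptr in cache' → dict lookup, else simulate and memoize
def altStep (gi : List Int) (k0 : Int) (st : Int × Nat × PySem.Dict Nat (Int × Nat)) (_r : Int) :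
    Int × Nat × PySem.Dict Nat (Int × Nat) :=
  match st.2.2.get? st.2.1 with
  | some v => (st.1 + v.1, v.2, st.2.2)
  | none =>
    let v := rideB gi k0 st.2.1
    (st.1 + v.1, v.2, st.2.2.insert st.2.1 v)

def solve_alt (R : Int) (k0 : Int) (N : Int) (gi : List Int) : Int :=
  ((PySem.List.pyRange 0 R 1).foldl (altStep gi k0) (0, 0, PySem.Dict.empty)).1

-- ===== PRECONDITION & SPEC =====
-- A evaluates gi[0] before the ride loop, so it raises IndexError exactly when gi = []
def Pre_solve (R : Int) (k0 : Int) (N : Int) (gi : List Int) : Prop := gi ≠ []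
instance (R : Int) (k0 : Int) (N : Int) (gi : List Int) : Decidable (Pre_solve R k0 N gi) := by unfold Pre_solve; infer_instance
def pvWitness_solve : Int × Int × Int × List Int := (2, 5, 1, [3, 1, 4])

def Spec_solve (R : Int) (k0 : Int) (N : Int) (gi : List Int) (out : Int) : Prop := out = solve_alt R k0 N gi
instance (R : Int) (k0 : Int) (N : Int) (gi : List Int) (out : Int) : Decidable (Spec_solve R k0 N gi out) := by unfold Spec_solve; infer_instance

-- ===== CLAIM (what is proved, stated in full; the proofs are below) =====
def Claim_equal_solve : Prop := ∀ (R : Int) (k0 : Int) (N : Int) (gi : List Int), Dom_solve R k0 N gi → Pre_solve R k0 N gi → Spec_solve R k0 N gi (solve R k0 N gi)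

-- ===== LEMMAS AND PROOFS =====

-- accumulator lemma for B's ride loop
lemma rideAux_earn (gi : List Int) : ∀ (fuel : Nat) (k earn : Int) (q : Nat),
    rideAux gi k earn q fuel = (earn + (rideAux gi k 0 q fuel).1, (rideAux gi k 0 q fuel).2) := by
  intro fuel
  induction fuel with
  | zero => intro k earn q; simp [rideAux]
  | succ n ih =>
    intro k earn q
    simp only [rideAux]
    split_ifs with h
    · simp
    · rw [ih (k - gi.getD q 0) (earn + gi.getD q 0), ih (k - gi.getD q 0) (0 + gi.getD q 0)]
      simp only [Prod.mk.injEq]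
      exact ⟨by ring, by simp⟩

-- B's ride loop keeps its pointer in range
lemma rideAux_lt (gi : List Int) : ∀ (fuel : Nat) (k earn : Int) (q : Nat), q < gi.length →
    (rideAux gi k earn q fuel).2 < gi.length := by
  intro fuel
  induction fuel with
  | zero => intro k earn q hq; simpa [rideAux] using hq
  | succ n ih =>
    intro k earn q hq
    simp only [rideAux]
    split_ifs with h
    · exact hq
    · exact ih _ _ _ (Nat.mod_lt _ (by omega))

-- A's inner while loop equals B's ride loop (fuel = remaining iterations)
lemma inner_eq (gi : List Int) : ∀ (fuel G : Nat) (k money : Int) (q : Nat),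
    q < gi.length → G + fuel = gi.length →
    innerA gi k money G q (gi.getD q 0) =
      (money + (rideAux gi k 0 q fuel).1, (rideAux gi k 0 q fuel).2,
        gi.getD (rideAux gi k 0 q fuel).2 0) := by
  intro fuel
  induction fuel with
  | zero =>
    intro G k money q hq hG
    rw [innerA, dif_neg (by omega)]
    simp [rideAux]
  | succ n ih =>
    intro G k money q hq hG
    rw [innerA]
    by_cases h : gi.getD q 0 ≤ k
    · rw [dif_pos ⟨h, by omega⟩]
      have hptr : (if q + 1 < gi.length then q + 1 else 0) = (q + 1) % gi.length := by
        by_cases hlt : q + 1 < gi.length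
        · simp [hlt, Nat.mod_eq_of_lt hlt]
        · have heq : q + 1 = gi.length := by omega
          simp [hlt, heq]
      rw [hptr, ih (G + 1) (k - gi.getD q 0) (money + gi.getD q 0) ((q + 1) % gi.length)
            (Nat.mod_lt _ (by omega)) (by omega)]
      have hr : rideAux gi k 0 q (n + 1)
          = rideAux gi (k - gi.getD q 0) (0 + gi.getD q 0) ((q + 1) % gi.length) n := by
        simp only [rideAux]
        rw [if_neg (by omega)]
      rw [hr, rideAux_earn gi n (k - gi.getD q 0) (0 + gi.getD q 0)]
      simp only [Prod.mk.injEq]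
      exact ⟨by ring, by simp⟩
    · rw [dif_neg (by tauto)]
      have hr : rideAux gi k 0 q (n + 1) = (0, q) := by
        simp only [rideAux]
        rw [if_pos (by omega)]
      rw [hr]
      simp

-- cache invariant: every memoized entry is the ride outcome of its key
def CacheInv (gi : List Int) (k0 : Int) (cache : PySem.Dict Nat (Int × Nat)) : Prop :=
  ∀ p v, cache.get? p = some v → v = rideB gi k0 p

-- outer ride loop: A's state (money, ptr, gi[ptr]) tracks B's state (money, ptr, cache)
lemma outer_eq (gi : List Int) (k0 : Int) (l : List Int) :
    ∀ (money : Int) (ptr : Nat) (cache : PySem.Dict Nat (Int × Nat)),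
    ptr < gi.length → CacheInv gi k0 cache →
    (l.foldl (solveStep gi k0) (money, ptr, gi.getD ptr 0)).1 =
      (l.foldl (altStep gi k0) (money, ptr, cache)).1 := by
  induction l with
  | nil => intro money ptr cache _ _; rfl
  | cons a l ih =>
    intro money ptr cache hptr hinv
    simp only [List.foldl_cons]
    have hA : solveStep gi k0 (money, ptr, gi.getD ptr 0) a =
        (money + (rideB gi k0 ptr).1, (rideB gi k0 ptr).2, gi.getD (rideB gi k0 ptr).2 0) := by
      simpa [solveStep, rideB] using
        inner_eq gi gi.length 0 k0 money ptr hptr (by omega)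
    rw [hA]
    cases hc : cache.get? ptr with
    | some v =>
      have hv : v = rideB gi k0 ptr := hinv ptr v hc
      have hB : altStep gi k0 (money, ptr, cache) a =
          (money + (rideB gi k0 ptr).1, (rideB gi k0 ptr).2, cache) := by
        simp [altStep, hc, hv]
      rw [hB]
      exact ih _ _ _ (rideAux_lt gi gi.length k0 0 ptr hptr) hinv
    | none =>
      have hB : altStep gi k0 (money, ptr, cache) a =
          (money + (rideB gi k0 ptr).1, (rideB gi k0 ptr).2,
            cache.insert ptr (rideB gi k0 ptr)) := by
        simp [altStep, hc]
      rw [hB]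
      refine ih _ _ _ (rideAux_lt gi gi.length k0 0 ptr hptr) ?_
      intro p v hp
      rw [PySem.Dict.get?_insert] at hp
      by_cases hpe : p = ptr
      · simp [hpe] at hp; subst hpe; simpa using hp.symm
      · exact hinv p v (by simpa [hpe] using hp)

-- ===== VERDICT (by name: the statement is the Claim_ definition above) =====
theorem solve_spec : Claim_equal_solve := by
  intro R k0 N gi _ hpre
  unfold Spec_solve solve solve_alt
  exact outer_eq gi k0 _ 0 0 PySem.Dict.empty
    (by cases gi with | nil => exact absurd rfl hpre | cons a t => simp)
    (fun p v hp => by simp [PySem.Dict.get?_empty] at hp)
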